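-- pv_equiv track=rewrite | github.com/akhil-arvapalli/Academic_projects | backend/app/parsers.py | _guess_root
-- ===== SOURCE A (Python) =====
-- from typing import List, Tuple
--
-- def _guess_root(pairs: List[Tuple[int, str, str]]) -> int:
--     for idx, _, pos in pairs:
--         if pos.startswith("VB"):
--             return idx
--     for idx, _, pos in pairs:
--         if pos.startswith("NN"):
--             return idx
--     return 0
-- ===== SOURCE B (Python) =====
-- from typing import List, Tuple, Optional
--
-- def _guess_root(pairs: List[Tuple[int, str, str]]) -> int:
--     first_nn: Optional[int] = None
--     for idx, _, pos in pairs: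
--         if pos.startswith("VB"):
--             return idx
--         if first_nn is None and pos.startswith("NN"):
--             first_nn = idx
--     return first_nn if first_nn is not None else 0
-- ===== Notes on version B (the rewrite author's own statement) =====
-- stated objective: simpler
-- what changed: Replaced A's two sequential scans (one for VB, one for NN) with a single pass that returns immediately on the first VB while remembering the first NN index in an accumulator, returning it (or 0) at the end.
import Mathlib
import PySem

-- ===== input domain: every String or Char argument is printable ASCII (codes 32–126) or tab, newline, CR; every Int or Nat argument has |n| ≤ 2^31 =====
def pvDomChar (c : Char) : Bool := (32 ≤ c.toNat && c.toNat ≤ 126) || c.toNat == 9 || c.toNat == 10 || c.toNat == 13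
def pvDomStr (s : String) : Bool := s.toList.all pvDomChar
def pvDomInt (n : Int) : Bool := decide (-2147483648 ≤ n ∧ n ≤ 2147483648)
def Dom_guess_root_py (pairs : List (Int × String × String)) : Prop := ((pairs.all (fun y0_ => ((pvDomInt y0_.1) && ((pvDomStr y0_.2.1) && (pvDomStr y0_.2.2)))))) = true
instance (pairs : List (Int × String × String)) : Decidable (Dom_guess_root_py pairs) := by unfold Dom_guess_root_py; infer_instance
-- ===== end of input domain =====

-- B replaces A's two sequential scans with one pass that returns on the first VB
-- and remembers the first NN index in an accumulator (objective: simpler).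

-- ===== PORT A =====
-- first loop of A: return idx of first pair whose pos startswith "VB" (none = loop falls through)
def pvFindVB (pairs : List (Int × String × String)) : Option Int :=
  match pairs with
  | [] => none
  | (idx, _, pos) :: rest =>
      if PySem.Str.startswith pos "VB" then some idx else pvFindVB rest

-- second loop of A: return idx of first pair whose pos startswith "NN"
def pvFindNN (pairs : List (Int × String × String)) : Option Int :=
  match pairs with
  | [] => none
  | (idx, _, pos) :: rest =>
      if PySem.Str.startswith pos "NN" then some idx else pvFindNN rest

def guess_root_py (pairs : List (Int × String × String)) : Int :=
  match pvFindVB pairs with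
  | some idx => idx
  | none =>
      match pvFindNN pairs with
      | some idx => idx
      | none => 0

-- ===== PORT B =====
-- single pass carrying first_nn; returns immediately on VB
def pvAltLoop (pairs : List (Int × String × String)) (first_nn : Option Int) : Int :=
  match pairs with
  | [] => match first_nn with
          | some idx => idx
          | none => 0
  | (idx, _, pos) :: rest =>
      if PySem.Str.startswith pos "VB" then idx
      else pvAltLoop rest
        (if first_nn = none ∧ PySem.Str.startswith pos "NN" then some idx else first_nn)

def guess_root_py_alt (pairs : List (Int × String × String)) : Int :=
  pvAltLoop pairs none

-- ===== PRECONDITION & SPEC =====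
def Spec_guess_root_py (pairs : List (Int × String × String)) (out : Int) : Prop := out = guess_root_py_alt pairs
instance (pairs : List (Int × String × String)) (out : Int) : Decidable (Spec_guess_root_py pairs out) := by unfold Spec_guess_root_py; infer_instance

-- ===== CLAIM (what is proved, stated in full; the proofs are below) =====
def Claim_equal_guess_root_py : Prop := ∀ (pairs : List (Int × String × String)), Dom_guess_root_py pairs → Spec_guess_root_py pairs (guess_root_py pairs)

-- ===== LEMMAS AND PROOFS =====
-- loop invariant: the single pass equals "first VB, else the carried first_nn, else first NN, else 0"
theorem pvAltLoop_eq (pairs : List (Int × String × String)) (acc : Option Int) :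
    pvAltLoop pairs acc =
      match pvFindVB pairs with
      | some idx => idx
      | none =>
          match acc with
          | some j => j
          | none =>
              match pvFindNN pairs with
              | some idx => idx
              | none => 0 := by
  induction pairs generalizing acc with
  | nil => cases acc <;> simp [pvAltLoop, pvFindVB, pvFindNN]
  | cons hd tl ih =>
      obtain ⟨idx, w, pos⟩ := hd
      simp only [pvAltLoop, pvFindVB, pvFindNN]
      by_cases hvb : PySem.Str.startswith pos "VB" = true
      · rw [if_pos hvb, if_pos hvb]
      · rw [if_neg hvb, if_neg hvb, ih]
        by_cases hnn : PySem.Chars.startswith pos.toList ['N', 'N'] = true <;>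
          cases acc <;> simp [hnn]

-- ===== VERDICT (by name: the statement is the Claim_ definition above) =====
theorem guess_root_py_spec : Claim_equal_guess_root_py := by
  intro pairs _
  unfold Spec_guess_root_py guess_root_py guess_root_py_alt
  rw [pvAltLoop_eq]
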